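-- pv_equiv track=rewrite | github.com/DPNT-Sourcecode/CHK-jjnv01 | lib/solutions/CHK/checkout_solution.py | find_all_offers
-- ===== SOURCE A (Python) =====
-- special_offers = {"A": [(3, 130), (5, 200)],
--                   "B": [(2, 45)],
--                   "H": [(5, 45), (10, 80)],
--                   "K":[(2, 120)],
--                   "P":[(5, 200)],
--                   "Q":[(3, 80)],
--                   "V":[(2, 90), (3, 130)]
--                   }
--
-- def find_best_offer(item_name, amount, all_offers):
--     best_offer_amount, best_offer_price = 0, None
--     if item_name in special_offers:
--         for i in range(len(all_offers[item_name])):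
--             offer_amount = all_offers[item_name][i][0]
--             offer_price = all_offers[item_name][i][1]
--             if offer_amount <= amount and offer_amount > best_offer_amount:
--                 best_offer_price = offer_price
--                 best_offer_amount = offer_amount
--     return best_offer_amount, best_offer_price
--
-- def find_all_offers(item_name, amount):
--     offers = []
--     while amount > 0:
--         offer = find_best_offer(item_name, amount, special_offers)
--         offer_amount = offer[0]
--         offer_price = offer[1]
--         if offer_price is not None:
--             offers.append([offer_amount, offer_price])
--             amount -= offer_amount
--         else:
--             break
--     return offers
-- ===== SOURCE B (Python) =====
-- special_offers = {"A": [(3, 130), (5, 200)],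
--                   "B": [(2, 45)],
--                   "H": [(5, 45), (10, 80)],
--                   "K": [(2, 120)],
--                   "P": [(5, 200)],
--                   "Q": [(3, 80)],
--                   "V": [(2, 90), (3, 130)]
--                   }
--
-- def find_all_offers(item_name, amount):
--     offers = []
--     for offer_amount, offer_price in sorted(special_offers.get(item_name, []), reverse=True):
--         if amount > 0:
--             count = amount // offer_amount
--             offers.extend([offer_amount, offer_price] for _ in range(count))
--             amount -= count * offer_amount
--     return offers
-- ===== Notes on version B (the rewrite author's own statement) =====
-- stated objective: simpler
-- what changed: Replaces A's while-loop that rescans the whole offer list with find_best_offer on every iteration and subtracts one offer at a time by a single pass over the offers sorted by descending amount, computing how many times each offer applies with integer division.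
import Mathlib
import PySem

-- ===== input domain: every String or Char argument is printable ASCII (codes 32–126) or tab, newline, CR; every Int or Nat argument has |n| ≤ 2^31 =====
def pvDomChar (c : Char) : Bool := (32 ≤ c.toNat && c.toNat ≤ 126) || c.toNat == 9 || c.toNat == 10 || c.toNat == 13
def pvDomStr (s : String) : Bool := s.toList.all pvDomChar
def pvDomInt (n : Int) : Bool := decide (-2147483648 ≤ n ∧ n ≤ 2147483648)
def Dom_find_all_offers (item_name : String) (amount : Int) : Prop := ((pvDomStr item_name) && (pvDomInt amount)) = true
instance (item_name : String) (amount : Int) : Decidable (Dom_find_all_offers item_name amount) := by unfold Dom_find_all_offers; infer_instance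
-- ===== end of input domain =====

-- B replaces A's repeated greedy rescan-and-subtract loop by a single descending pass with
-- integer division (objective: simpler; same exact output).

-- ===== PORT A =====
def special_offers : PySem.Dict String (List (Int × Int)) :=
  PySem.Dict.ofList [("A", [(3, 130), (5, 200)]),
                     ("B", [(2, 45)]),
                     ("H", [(5, 45), (10, 80)]),
                     ("K", [(2, 120)]),
                     ("P", [(5, 200)]),
                     ("Q", [(3, 80)]),
                     ("V", [(2, 90), (3, 130)])]

-- the `for i in range(len(all_offers[item_name]))` loop of find_best_offer: indexing the whole
-- list in order is the fold over its elements; the branch order and the state are A's.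
def bestFold (lst : List (Int × Int)) (amount : Int) : Int × Option Int :=
  lst.foldl (fun best p => if p.1 ≤ amount ∧ best.1 < p.1 then (p.1, some p.2) else best)
    ((0 : Int), (none : Option Int))

-- `all_offers[item_name]`: at the only call site all_offers = special_offers and membership was
-- just checked, so the KeyError branch is unreachable and getD [] is exact.
def find_best_offer (item_name : String) (amount : Int)
    (all_offers : PySem.Dict String (List (Int × Int))) : Int × Option Int :=
  if special_offers.contains item_name then bestFold (all_offers.getD item_name []) amount
  else ((0 : Int), (none : Option Int))

-- A's while-loop.  Fuel amount.toNat+1 never runs out: every accepted offer has amount ≥ 1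
-- (the update requires offer_amount > best_offer_amount ≥ 0), so the loop body runs at most
-- amount times plus the final test.
def findAllLoop : Nat → String → Int → List (List Int) → List (List Int)
  | 0, _, _, offers => offers
  | f + 1, item_name, amount, offers =>
      if amount > 0 then
        match find_best_offer item_name amount special_offers with
        | (oa, some op) => findAllLoop f item_name (amount - oa) (offers ++ [[oa, op]])
        | (_, none) => offers
      else offers

def find_all_offers (item_name : String) (amount : Int) : List (List Int) :=
  findAllLoop (amount.toNat + 1) item_name amount []

-- ===== PORT B =====
-- one step of B's for-loop: state = (remaining amount, offers built so far)
def divStep (st : Int × List (List Int)) (p : Int × Int) : Int × List (List Int) :=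
  if st.1 > 0 then
    let count := PySem.Int.floordiv st.1 p.1
    (st.1 - count * p.1, st.2 ++ List.replicate count.toNat [p.1, p.2])
  else st

def find_all_offers_alt (item_name : String) (amount : Int) : List (List Int) :=
  let offers_desc :=
    PySem.List.sorted2 (special_offers.getD item_name []) (fun p => p.1) (fun p => p.2) true
  (offers_desc.foldl divStep (amount, [])).2

-- ===== PRECONDITION & SPEC =====
def Spec_find_all_offers (item_name : String) (amount : Int) (out : List (List Int)) : Prop := out = find_all_offers_alt item_name amount
instance (item_name : String) (amount : Int) (out : List (List Int)) : Decidable (Spec_find_all_offers item_name amount out) := by unfold Spec_find_all_offers; infer_instance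

-- ===== CLAIM (what is proved, stated in full; the proofs are below) =====
def Claim_equal_find_all_offers : Prop := ∀ (item_name : String) (amount : Int), Dom_find_all_offers item_name amount → Spec_find_all_offers item_name amount (find_all_offers item_name amount)

-- ===== LEMMAS AND PROOFS =====

-- A's loop appends: the accumulator factors out.
lemma findAllLoop_acc (f : Nat) (item : String) (a : Int) (acc : List (List Int)) :
    findAllLoop f item a acc = acc ++ findAllLoop f item a [] := by
  induction f generalizing a acc with
  | zero => simp [findAllLoop]
  | succ f ih =>
      simp only [findAllLoop]
      by_cases ha : a > 0
      · simp only [ha, if_pos]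
        cases h : find_best_offer item a special_offers with
        | mk oa op =>
          cases op with
          | none => simp
          | some p =>
              dsimp only
              rw [ih, ih (a - oa) ([] ++ [[oa, p]])]
              simp
      · simp [ha]

lemma not_found_loop (item : String) (h : special_offers.contains item = false) :
    ∀ f a, findAllLoop f item a [] = [] := by
  intro f a
  cases f with
  | zero => rfl
  | succ f =>
      simp [findAllLoop, find_best_offer, h]

-- pyfloordiv with a positive divisor is Int.ediv; abbreviations for the arithmetic below
lemma fd_nonpos (a o : Int) (ho : 0 < o) (ha : a ≤ 0) : PySem.Int.floordiv a o ≤ 0 := by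
  rw [PySem.Int.floordiv_eq_ediv_of_pos ho]
  rcases lt_or_eq_of_le ha with h | h
  · exact le_of_lt (Int.ediv_neg_of_neg_of_pos h ho)
  · simp [h]

lemma fd_shift (a o : Int) (ho : 0 < o) :
    PySem.Int.floordiv (a - o) o = PySem.Int.floordiv a o - 1 := by
  rw [PySem.Int.floordiv_eq_ediv_of_pos ho, PySem.Int.floordiv_eq_ediv_of_pos ho]
  have := Int.add_mul_ediv_right a (-1) (ne_of_gt ho)
  have e : a + -1 * o = a - o := by ring
  rw [e] at this
  omega

lemma fd_toNat_succ (a o : Int) (ho : 0 < o) (hoa : o ≤ a) :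
    (PySem.Int.floordiv a o).toNat = (PySem.Int.floordiv (a - o) o).toNat + 1 := by
  have h1 : 1 ≤ PySem.Int.floordiv a o := by
    rw [(PySem.Int.le_floordiv_iff_mul_le ho : 1 ≤ PySem.Int.floordiv a o ↔ 1 * o ≤ a)]
    omega
  have h2 := fd_shift a o ho
  have h3 : 0 ≤ PySem.Int.floordiv (a - o) o := by
    rw [PySem.Int.floordiv_eq_ediv_of_pos ho]
    exact Int.ediv_nonneg (by omega) (by omega)
  omega

lemma fd_zero_of_lt (a o : Int) (ho : 0 ≤ a) (h : a < o) : PySem.Int.floordiv a o = 0 := by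
  rw [PySem.Int.floordiv_eq_ediv_of_pos (by omega)]
  exact Int.ediv_eq_zero_of_lt ho h

lemma divStep_snd (r o p : Int) (ho : 0 < o) (hr : 0 ≤ r) :
    (divStep (r, []) (o, p)).2 = List.replicate ((PySem.Int.floordiv r o).toNat) [o, p] := by
  simp only [divStep]
  split_ifs with h
  · simp
  · have hr0 : r = 0 := by omega
    subst hr0
    have : PySem.Int.floordiv 0 o = 0 := fd_zero_of_lt 0 o le_rfl ho
    simp [this]

-- one-offer item: the greedy loop equals one division step
lemma shape1 (item : String) (o p : Int)
    (h1 : special_offers.contains item = true)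
    (h2 : special_offers.getD item [] = [(o, p)]) (ho : 1 ≤ o) :
    ∀ f a, a.toNat < f →
      findAllLoop f item a [] = (([(o, p)] : List (Int × Int)).foldl divStep (a, [])).2 := by
  intro f
  induction f with
  | zero => intro a h; omega
  | succ f ih =>
      intro a hf
      have hbest : bestFold [(o, p)] a = if o ≤ a then (o, some p) else (0, none) := by
        simp only [bestFold, List.foldl]
        split_ifs with h' h'' <;> simp_all; omega
      simp only [findAllLoop, find_best_offer, h1, if_true, h2, hbest]
      by_cases ha : a > 0
      · simp only [ha, if_true]
        by_cases hoa : o ≤ a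
        · simp only [hoa, if_true]
          rw [findAllLoop_acc, ih (a - o) (by omega)]
          simp only [List.foldl]
          rw [divStep_snd (a - o) o p (by omega) (by omega),
              divStep_snd a o p (by omega) (by omega),
              fd_toNat_succ a o (by omega) hoa, List.replicate_succ]
          simp
        · simp only [hoa, if_false]
          simp only [List.foldl]
          rw [divStep_snd a o p (by omega) (by omega), fd_zero_of_lt a o (by omega) (by omega)]
          simp
      · simp only [ha, if_false]
        simp [List.foldl, divStep, ha]

lemma divStep_acc (r : Int) (acc : List (List Int)) (q : Int × Int) :
    divStep (r, acc) q = ((divStep (r, []) q).1, acc ++ (divStep (r, []) q).2) := by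
  simp only [divStep]
  split_ifs <;> simp

-- closed form of B's two-offer descending pass
lemma twofold_snd (a o2 p2 o1 p1 : Int) (ho1 : 0 < o1) (ho2 : 0 < o2) :
    (([(o2, p2), (o1, p1)] : List (Int × Int)).foldl divStep (a, [])).2 =
      List.replicate (PySem.Int.floordiv a o2).toNat [o2, p2] ++
        List.replicate (PySem.Int.floordiv
          (if 0 < a then a - PySem.Int.floordiv a o2 * o2 else a) o1).toNat [o1, p1] := by
  simp only [List.foldl]
  by_cases ha : 0 < a
  · have hstep : divStep (a, []) (o2, p2) =
        (a - PySem.Int.floordiv a o2 * o2,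
          List.replicate (PySem.Int.floordiv a o2).toNat [o2, p2]) := by
      simp [divStep, ha]
    have hr : 0 ≤ a - PySem.Int.floordiv a o2 * o2 := by
      have hm := PySem.Int.floordiv_mul_add_mod a o2
      have := PySem.Int.mod_nonneg a ho2
      omega
    rw [hstep, divStep_acc, divStep_snd _ o1 p1 ho1 hr]
    simp [ha]
  · have h0 : divStep (a, []) (o2, p2) = (a, []) := by simp [divStep, ha]
    have h0' : divStep (a, []) (o1, p1) = (a, []) := by simp [divStep, ha]
    have t2 : (PySem.Int.floordiv a o2).toNat = 0 := by
      have := fd_nonpos a o2 ho2 (by omega); omega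
    have t1 : (PySem.Int.floordiv a o1).toNat = 0 := by
      have := fd_nonpos a o1 ho1 (by omega); omega
    rw [h0, h0']
    simp [ha, t1, t2]

-- two-offer item (ascending in the table, descending in B's pass)
lemma shape2 (item : String) (o1 p1 o2 p2 : Int)
    (h1 : special_offers.contains item = true)
    (h2 : special_offers.getD item [] = [(o1, p1), (o2, p2)]) (ho : 1 ≤ o1) (hlt : o1 < o2) :
    ∀ f a, a.toNat < f →
      findAllLoop f item a [] =
        (([(o2, p2), (o1, p1)] : List (Int × Int)).foldl divStep (a, [])).2 := by
  intro f
  induction f with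
  | zero => intro a h; omega
  | succ f ih =>
      intro a hf
      have hbest : bestFold [(o1, p1), (o2, p2)] a =
          if o2 ≤ a then (o2, some p2) else if o1 ≤ a then (o1, some p1) else (0, none) := by
        simp only [bestFold, List.foldl]
        split_ifs <;> simp_all <;> omega
      simp only [findAllLoop, find_best_offer, h1, if_true, h2, hbest]
      rw [twofold_snd a o2 p2 o1 p1 (by omega) (by omega)]
      by_cases ha : a > 0
      · simp only [ha, if_true]
        by_cases h2a : o2 ≤ a
        · simp only [h2a, if_true]
          rw [findAllLoop_acc, ih (a - o2) (by omega),
              twofold_snd (a - o2) o2 p2 o1 p1 (by omega) (by omega)]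
          have hfd2 := fd_shift a o2 (by omega)
          have hrem : (if 0 < a - o2 then a - o2 - PySem.Int.floordiv (a - o2) o2 * o2
              else a - o2) = (if 0 < a then a - PySem.Int.floordiv a o2 * o2 else a) := by
            rw [hfd2]
            split_ifs with hx
            · ring_nf
            · have hae : a = o2 := by omega
              have : PySem.Int.floordiv a o2 = 1 := by
                rw [hae, PySem.Int.floordiv_eq_ediv_of_pos (by omega : (0:Int) < o2)]
                exact Int.ediv_self (by omega)
              rw [this]; omega
          rw [hrem, fd_toNat_succ a o2 (by omega) h2a, List.replicate_succ]
          simp [ha]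
        · simp only [h2a, if_false]
          have hz2 : PySem.Int.floordiv a o2 = 0 := fd_zero_of_lt a o2 (by omega) (by omega)
          by_cases h1a : o1 ≤ a
          · simp only [h1a, if_true]
            rw [findAllLoop_acc, ih (a - o1) (by omega),
                twofold_snd (a - o1) o2 p2 o1 p1 (by omega) (by omega)]
            have hz2' : PySem.Int.floordiv (a - o1) o2 = 0 :=
              fd_zero_of_lt (a - o1) o2 (by omega) (by omega)
            have hrem' : (if 0 < a - o1 then a - o1 - 0 * o2 else a - o1) = a - o1 := by
              split_ifs <;> omega
            rw [hz2, hz2', hrem']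
            have e : a - 0 * o2 = a := by ring
            rw [e, fd_toNat_succ a o1 (by omega) h1a, List.replicate_succ]
            simp
          · simp only [h1a, if_false]
            have hz1 : PySem.Int.floordiv a o1 = 0 := fd_zero_of_lt a o1 (by omega) (by omega)
            simp [hz1, hz2]
      · simp only [ha, if_false]
        have t2 : (PySem.Int.floordiv a o2).toNat = 0 := by
          have := fd_nonpos a o2 (by omega) (by omega); omega
        have t1 : (PySem.Int.floordiv a o1).toNat = 0 := by
          have := fd_nonpos a o1 (by omega) (by omega); omega
        simp [t1, t2]

-- ===== VERDICT (by name: the statement is the Claim_ definition above) =====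
theorem find_all_offers_spec : Claim_equal_find_all_offers := by
  intro item_name a _
  unfold Spec_find_all_offers find_all_offers find_all_offers_alt
  by_cases hA : item_name = "A"
  · subst hA
    have hc : special_offers.contains "A" = true := by decide
    have hg : special_offers.getD "A" [] = [(3, 130), (5, 200)] := by decide
    have hs : PySem.List.sorted2 ([(3, 130), (5, 200)] : List (Int × Int))
        (fun p => p.1) (fun p => p.2) true = [(5, 200), (3, 130)] := by decide
    simp only [hg, hs]
    exact shape2 "A" 3 130 5 200 hc hg (by omega) (by omega) (a.toNat + 1) a (by omega)
  by_cases hB : item_name = "B"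
  · subst hB
    have hc : special_offers.contains "B" = true := by decide
    have hg : special_offers.getD "B" [] = [(2, 45)] := by decide
    have hs : PySem.List.sorted2 ([(2, 45)] : List (Int × Int))
        (fun p => p.1) (fun p => p.2) true = [(2, 45)] := by decide
    simp only [hg, hs]
    exact shape1 "B" 2 45 hc hg (by omega) (a.toNat + 1) a (by omega)
  by_cases hH : item_name = "H"
  · subst hH
    have hc : special_offers.contains "H" = true := by decide
    have hg : special_offers.getD "H" [] = [(5, 45), (10, 80)] := by decide
    have hs : PySem.List.sorted2 ([(5, 45), (10, 80)] : List (Int × Int))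
        (fun p => p.1) (fun p => p.2) true = [(10, 80), (5, 45)] := by decide
    simp only [hg, hs]
    exact shape2 "H" 5 45 10 80 hc hg (by omega) (by omega) (a.toNat + 1) a (by omega)
  by_cases hK : item_name = "K"
  · subst hK
    have hc : special_offers.contains "K" = true := by decide
    have hg : special_offers.getD "K" [] = [(2, 120)] := by decide
    have hs : PySem.List.sorted2 ([(2, 120)] : List (Int × Int))
        (fun p => p.1) (fun p => p.2) true = [(2, 120)] := by decide
    simp only [hg, hs]
    exact shape1 "K" 2 120 hc hg (by omega) (a.toNat + 1) a (by omega)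
  by_cases hP : item_name = "P"
  · subst hP
    have hc : special_offers.contains "P" = true := by decide
    have hg : special_offers.getD "P" [] = [(5, 200)] := by decide
    have hs : PySem.List.sorted2 ([(5, 200)] : List (Int × Int))
        (fun p => p.1) (fun p => p.2) true = [(5, 200)] := by decide
    simp only [hg, hs]
    exact shape1 "P" 5 200 hc hg (by omega) (a.toNat + 1) a (by omega)
  by_cases hQ : item_name = "Q"
  · subst hQ
    have hc : special_offers.contains "Q" = true := by decide
    have hg : special_offers.getD "Q" [] = [(3, 80)] := by decide
    have hs : PySem.List.sorted2 ([(3, 80)] : List (Int × Int))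
        (fun p => p.1) (fun p => p.2) true = [(3, 80)] := by decide
    simp only [hg, hs]
    exact shape1 "Q" 3 80 hc hg (by omega) (a.toNat + 1) a (by omega)
  by_cases hV : item_name = "V"
  · subst hV
    have hc : special_offers.contains "V" = true := by decide
    have hg : special_offers.getD "V" [] = [(2, 90), (3, 130)] := by decide
    have hs : PySem.List.sorted2 ([(2, 90), (3, 130)] : List (Int × Int))
        (fun p => p.1) (fun p => p.2) true = [(3, 130), (2, 90)] := by decide
    simp only [hg, hs]
    exact shape2 "V" 2 90 3 130 hc hg (by omega) (by omega) (a.toNat + 1) a (by omega)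
  -- item with no offers: both sides are []
  · have hc : special_offers.contains item_name = false := by
      rw [PySem.Dict.contains_eq_decide_mem_keys]
      have hk : special_offers.keys = ["A", "B", "H", "K", "P", "Q", "V"] := by decide
      simp [hk, hA, hB, hH, hK, hP, hQ, hV]
    have hg : special_offers.getD item_name [] = ([] : List (Int × Int)) :=
      PySem.Dict.getD_of_not_contains _ _ hc
    rw [not_found_loop item_name hc]
    simp only [hg]
    rfl
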